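-- pv_equiv track=rewrite | github.com/pypi-data/pypi-mirror-360 | packages/pisces-ms/pisces_ms-0.3-py3-none-any.whl/pisces/format_exhaustive.py | create_mod_seq
-- ===== SOURCE A (Python) =====
-- def create_mod_seq(peptide, mods):
--     """ Function to create a modified sequence for a peptide.
--     """
--     if not mods:
--         return peptide
--     mod_seq = ''
--     for a_a in peptide:
--         if a_a == 'C' and 'cam' in mods:
--             mod_seq += 'C[+57.0]'
--         elif a_a == 'M' and 'ox' in mods:
--             mod_seq += 'M[+16.0]'
--         else:
--             mod_seq += a_a
--     return mod_seq
-- ===== SOURCE B (Python) =====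
-- def create_mod_seq(peptide, mods):
--     """ Function to create a modified sequence for a peptide.
--     """
--     if not mods:
--         return peptide
--     seq = peptide
--     if 'cam' in mods:
--         seq = seq.replace('C', 'C[+57.0]')
--     if 'ox' in mods:
--         seq = seq.replace('M', 'M[+16.0]')
--     return seq
-- ===== Notes on version B (the rewrite author's own statement) =====
-- stated objective: simpler
-- what changed: Replaced the per-character accumulation loop with two conditional whole-string str.replace passes.
import Mathlib
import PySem

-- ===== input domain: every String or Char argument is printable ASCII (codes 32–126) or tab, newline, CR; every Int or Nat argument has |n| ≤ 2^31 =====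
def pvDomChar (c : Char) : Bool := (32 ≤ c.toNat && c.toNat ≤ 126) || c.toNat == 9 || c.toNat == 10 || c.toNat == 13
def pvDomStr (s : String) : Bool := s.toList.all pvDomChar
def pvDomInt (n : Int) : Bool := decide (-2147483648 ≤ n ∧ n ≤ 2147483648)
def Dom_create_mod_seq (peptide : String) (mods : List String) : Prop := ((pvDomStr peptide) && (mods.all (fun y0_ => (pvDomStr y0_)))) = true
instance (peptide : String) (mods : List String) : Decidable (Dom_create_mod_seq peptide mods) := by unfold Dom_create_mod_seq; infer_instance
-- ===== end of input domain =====

-- B replaces A's per-character accumulation loop with two conditional whole-string replace passes (simpler).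

-- ===== PORT A =====
-- the loop body: what gets appended to mod_seq for this character
def create_mod_seq (peptide : String) (mods : List String) : String :=
  if mods = [] then peptide
  else
    String.ofList
      (peptide.toList.foldl
        (fun mod_seq a_a =>
          if a_a = 'C' ∧ "cam" ∈ mods then mod_seq ++ "C[+57.0]".toList
          else if a_a = 'M' ∧ "ox" ∈ mods then mod_seq ++ "M[+16.0]".toList
          else mod_seq ++ [a_a]) [])

-- ===== PORT B =====
def create_mod_seq_alt (peptide : String) (mods : List String) : String :=
  if mods = [] then peptide
  else
    let seq := if "cam" ∈ mods then PySem.Str.replace peptide "C" "C[+57.0]" else peptide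
    let seq := if "ox" ∈ mods then PySem.Str.replace seq "M" "M[+16.0]" else seq
    seq

-- ===== PRECONDITION & SPEC =====
def Spec_create_mod_seq (peptide : String) (mods : List String) (out : String) : Prop := out = create_mod_seq_alt peptide mods
instance (peptide : String) (mods : List String) (out : String) : Decidable (Spec_create_mod_seq peptide mods out) := by unfold Spec_create_mod_seq; infer_instance

-- ===== CLAIM (what is proved, stated in full; the proofs are below) =====
def Claim_equal_create_mod_seq : Prop := ∀ (peptide : String) (mods : List String), Dom_create_mod_seq peptide mods → Spec_create_mod_seq peptide mods (create_mod_seq peptide mods)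

-- ===== LEMMAS AND PROOFS =====

-- single-character replace is a per-character expansion
theorem replace_go_single (o : Char) (new : List Char) :
    ∀ (l acc : List Char) (fuel : Nat), l.length ≤ fuel →
      PySem.Chars.replace.go [o] new fuel l acc =
        acc.reverse ++ l.flatMap (fun c => if c = o then new else [c]) := by
  intro l
  induction l with
  | nil =>
    intro acc fuel _
    cases fuel <;> simp [PySem.Chars.replace.go]
  | cons c t ih =>
    intro acc fuel hlen
    cases fuel with
    | zero => simp at hlen
    | succ fuel =>
      simp only [List.length_cons, Nat.succ_le_succ_iff] at hlen
      by_cases h : c = o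
      · subst h
        have hpre : List.isPrefixOf [c] (c :: t) = true := by
          simp [List.isPrefixOf]
        simp only [PySem.Chars.replace.go, hpre, if_pos, List.length_cons, List.length_nil]
        rw [show List.drop (0+1) (c :: t) = t from rfl]
        rw [ih _ fuel (by simpa using hlen)]
        simp [List.flatMap_cons]
      · have hpre : List.isPrefixOf [o] (c :: t) = false := by
          simp [List.isPrefixOf]
          intro hco; exact absurd hco.symm h
        simp only [PySem.Chars.replace.go, hpre]
        rw [ih _ fuel hlen]
        simp [List.flatMap_cons, h]

theorem replace_single (o : Char) (new s : List Char) :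
    PySem.Chars.replace s [o] new = s.flatMap (fun c => if c = o then new else [c]) := by
  rw [PySem.Chars.replace]
  simp only [List.isEmpty_cons, Bool.false_eq_true, if_false]
  simpa using replace_go_single o new s [] s.length (le_refl _)

theorem create_mod_seq_spec' (peptide : String) (mods : List String) :
    create_mod_seq peptide mods = create_mod_seq_alt peptide mods := by
  unfold create_mod_seq create_mod_seq_alt
  by_cases hm : mods = []
  · simp [hm]
  · simp only [hm, if_false]
    apply String.toList_injective
    rw [String.toList_ofList]
    have hbody : (fun (mod_seq : List Char) (a_a : Char) =>
          if a_a = 'C' ∧ "cam" ∈ mods then mod_seq ++ "C[+57.0]".toList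
          else if a_a = 'M' ∧ "ox" ∈ mods then mod_seq ++ "M[+16.0]".toList
          else mod_seq ++ [a_a]) =
        (fun (mod_seq : List Char) (a_a : Char) => mod_seq ++
          (if a_a = 'C' ∧ "cam" ∈ mods then "C[+57.0]".toList
           else if a_a = 'M' ∧ "ox" ∈ mods then "M[+16.0]".toList
           else [a_a])) := by
      funext mod_seq a_a; split_ifs <;> rfl
    rw [hbody, PySem.List.foldl_append_eq_flatMap]
    have hC : "C".toList = ['C'] := rfl
    have hM : "M".toList = ['M'] := rfl
    by_cases hc : "cam" ∈ mods <;> by_cases ho : "ox" ∈ mods <;>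
      simp only [hc, ho, if_true, if_false, PySem.Str.toList_replace, hC, hM,
        replace_single, List.nil_append, and_true, and_false]
    · -- both mods: compose the two flatMaps
      rw [List.flatMap_assoc]
      refine List.flatMap_congr (fun x _ => ?_)
      by_cases h1 : x = 'C'
      · subst h1; decide
      · by_cases h2 : x = 'M' <;> simp [h1, h2]
    · simp

-- ===== VERDICT (by name: the statement is the Claim_ definition above) =====
theorem create_mod_seq_spec : Claim_equal_create_mod_seq := by
  intro peptide mods _
  unfold Spec_create_mod_seq
  exact create_mod_seq_spec' peptide mods
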